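-- pv_equiv track=rewrite | github.com/Denmerck/List-Manipulator-py | module/list.py | replaceitems
-- ===== SOURCE A (Python) =====
-- def replaceitems(A: list, target: any, value: any) -> list:
--     """
--     Replaces all items in a list
--
--     :param A: Target list
--     :type A: list
--     :param target: Target item
--     :type target: any
--     :param value: Replacement Value
--     :type value: any
--
--     :return: Updated list
--     """
--     cacheA = list.copy(A)
--     A.clear()
--     for i in cacheA:
--         if i == target:
--             A.append(value)
--         else:
--             A.append(i)
--     return A
-- ===== SOURCE B (Python) =====
-- def replaceitems(A: list, target: any, value: any) -> list:
--     # Pass 1: collect the indices of matching elements; Pass 2: write value there in place.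
--     hits = [idx for idx, item in enumerate(A) if item == target]
--     for idx in hits:
--         A[idx] = value
--     return A
-- ===== Notes on version B (the rewrite author's own statement) =====
-- stated objective: alternative
-- what changed: B works in two staged passes - it first collects the indices of matching elements, then writes the replacement in place at exactly those indices - instead of copying the list, clearing it and re-appending every element; both mutate A and return it.
import Mathlib
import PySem

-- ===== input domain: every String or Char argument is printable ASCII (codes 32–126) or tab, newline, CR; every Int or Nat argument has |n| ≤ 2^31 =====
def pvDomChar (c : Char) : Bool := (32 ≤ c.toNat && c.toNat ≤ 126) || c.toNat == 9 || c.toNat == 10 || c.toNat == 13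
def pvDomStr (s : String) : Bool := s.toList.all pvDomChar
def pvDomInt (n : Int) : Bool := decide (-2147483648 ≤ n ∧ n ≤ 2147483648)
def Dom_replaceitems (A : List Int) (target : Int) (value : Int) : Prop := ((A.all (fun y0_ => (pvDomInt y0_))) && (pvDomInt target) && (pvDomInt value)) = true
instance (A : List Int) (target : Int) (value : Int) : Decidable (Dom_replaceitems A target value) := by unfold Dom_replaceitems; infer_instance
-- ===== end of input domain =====

-- B replaces matches in two staged passes instead of A's copy/clear/rebuild; both mutate A in
-- place and return it, so the proved return-value equivalence matches the observable effect too.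

-- ===== PORT A =====
-- A: copy the list, clear it, then append (value if i == target else i) for each cached element
def replaceitems (A : List Int) (target : Int) (value : Int) : List Int :=
  let cacheA := A
  cacheA.foldl (fun acc i => acc ++ [if i == target then value else i]) []

-- ===== PORT B =====
-- B pass 1: hits = [idx for idx, item in enumerate(A) if item == target]
def replHits (A : List Int) (target : Int) : List Int :=
  ((PySem.List.enumerate A 0).filter (fun p => p.2 == target)).map (·.1)

-- B pass 2: for idx in hits: A[idx] = value; return A
def replaceitems_alt (A : List Int) (target : Int) (value : Int) : List Int :=
  (replHits A target).foldl (fun l idx => PySem.List.pySetD l idx value) A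

-- ===== PRECONDITION & SPEC =====
def Spec_replaceitems (A : List Int) (target : Int) (value : Int) (out : List Int) : Prop := out = replaceitems_alt A target value
instance (A : List Int) (target : Int) (value : Int) (out : List Int) : Decidable (Spec_replaceitems A target value out) := by unfold Spec_replaceitems; infer_instance

-- ===== CLAIM (what is proved, stated in full; the proofs are below) =====
def Claim_equal_replaceitems : Prop := ∀ (A : List Int) (target : Int) (value : Int), Dom_replaceitems A target value → Spec_replaceitems A target value (replaceitems A target value)

-- ===== LEMMAS AND PROOFS =====

-- A's fold equals a map
theorem replA_eq_map (A : List Int) (target value : Int) (acc : List Int) :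
    A.foldl (fun acc i => acc ++ [if i == target then value else i]) acc
      = acc ++ A.map (fun i => if i == target then value else i) := by
  induction A generalizing acc with
  | nil => simp
  | cons x xs ih => rw [List.foldl_cons, ih]; simp

-- B: writing value at the matched indices of rest (enumerated from offset pre.length)
-- into pre ++ rest maps rest and leaves pre alone
theorem replB_inv (target value : Int) (rest pre : List Int) :
    (((PySem.List.enumerate rest (pre.length : Int)).filter (fun p => p.2 == target)).map (·.1)).foldl
        (fun l idx => PySem.List.pySetD l idx value) (pre ++ rest)
      = pre ++ rest.map (fun i => if i == target then value else i) := by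
  induction rest generalizing pre with
  | nil => simp
  | cons x xs ih =>
    rw [PySem.List.enumerate_cons]
    by_cases hx : x = target
    · have hset : PySem.List.pySetD (pre ++ x :: xs) (pre.length : Int) value
          = (pre ++ [value]) ++ xs := by
        rw [PySem.List.pySetD_natCast]
        induction pre with
        | nil => simp
        | cons a as ihp => simp [ihp]
      have := ih (pre ++ [value])
      simp only [List.length_append, List.length_cons, List.length_nil] at this
      rw [List.filter_cons, if_pos (by simp [hx]), List.map_cons, List.foldl_cons, hset,
        show ((pre.length : Int) + 1) = ((pre ++ [value]).length : Int) by simp]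
      simpa [hx] using this
    · have := ih (pre ++ [x])
      simp only [List.length_append, List.length_cons, List.length_nil] at this
      rw [List.filter_cons, if_neg (by simp [hx]),
        show pre ++ x :: xs = (pre ++ [x]) ++ xs by simp,
        show ((pre.length : Int) + 1) = ((pre ++ [x]).length : Int) by simp]
      simpa [hx] using this

-- ===== VERDICT (by name: the statement is the Claim_ definition above) =====
theorem replaceitems_spec : Claim_equal_replaceitems := by
  intro A target value _
  unfold Spec_replaceitems replaceitems replaceitems_alt replHits
  have hB := replB_inv target value A []
  simp only [List.length_nil, Nat.cast_zero, List.nil_append] at hB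
  rw [hB, replA_eq_map]
  simp
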